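-- pv_equiv track=rewrite | github.com/lorenzo-federici/LUS-multitask-learning | src/utils/visual_lib.py | create_flexible_grid
-- ===== SOURCE A (Python) =====
-- def create_flexible_grid(batch_size):
--     num_rows = 1
--     num_cols = 1
--     while num_rows * num_cols < batch_size:
--         if num_rows == num_cols:
--             num_cols *= 2
--         else:
--             num_rows *= 2
--
--     return num_rows, num_cols
-- ===== SOURCE B (Python) =====
-- def create_flexible_grid(batch_size):
--     n = max(1, batch_size)
--     k = (n - 1).bit_length()  # smallest k with 2**k >= n
--     return (1 << (k // 2), 1 << ((k + 1) // 2))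
-- ===== Notes on version B (the rewrite author's own statement) =====
-- stated objective: simpler
-- what changed: Replaces the doubling while-loop with a closed form: with k the bit length of max(1,batch_size)-1 (the least k with 2**k >= batch_size), the grid is (2**(k//2), 2**((k+1)//2)); O(1) arithmetic instead of a loop, though too fast either way for a timing run to measure.
import Mathlib
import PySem

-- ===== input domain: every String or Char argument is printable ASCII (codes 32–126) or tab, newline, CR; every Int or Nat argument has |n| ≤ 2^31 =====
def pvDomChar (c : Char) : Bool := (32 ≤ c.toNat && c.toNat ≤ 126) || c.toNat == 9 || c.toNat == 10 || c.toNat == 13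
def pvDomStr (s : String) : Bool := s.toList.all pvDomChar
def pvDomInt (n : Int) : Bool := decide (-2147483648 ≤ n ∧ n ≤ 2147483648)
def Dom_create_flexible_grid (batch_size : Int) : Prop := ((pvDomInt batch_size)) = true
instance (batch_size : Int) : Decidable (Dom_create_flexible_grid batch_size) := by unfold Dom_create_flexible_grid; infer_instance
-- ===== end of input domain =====

-- B replaces A's doubling while-loop by a closed form via integer bit length (simpler: no loop).

-- ===== PORT A =====
-- the while loop of A; the 0 < r, 0 < c proof arguments only justify termination
def gridLoop (n : Int) (r c : Int) (hr : 0 < r) (hc : 0 < c) : Int × Int :=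
  if h : r * c < n then
    if r = c then gridLoop n r (c * 2) hr (by omega)
    else gridLoop n (r * 2) c (by omega) hc
  else (r, c)
termination_by (n - r * c).toNat
decreasing_by
  · have : 0 < r * c := mul_pos hr hc
    have : r * (c * 2) = r * c + r * c := by ring
    omega
  · have : 0 < r * c := mul_pos hr hc
    have : r * 2 * c = r * c + r * c := by ring
    omega

def create_flexible_grid (batch_size : Int) : Int × Int :=
  gridLoop batch_size 1 1 one_pos one_pos

-- ===== PORT B =====
-- int.bit_length of a nonnegative integer
def bitLen : Nat → Nat
  | 0 => 0
  | m + 1 => bitLen ((m + 1) / 2) + 1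

def create_flexible_grid_alt (batch_size : Int) : Int × Int :=
  let n : Int := max 1 batch_size
  let k : Nat := bitLen (n - 1).toNat
  (2 ^ (k / 2), 2 ^ ((k + 1) / 2))

-- ===== PRECONDITION & SPEC =====
def Spec_create_flexible_grid (batch_size : Int) (out : Int × Int) : Prop := out = create_flexible_grid_alt batch_size
instance (batch_size : Int) (out : Int × Int) : Decidable (Spec_create_flexible_grid batch_size out) := by unfold Spec_create_flexible_grid; infer_instance

-- ===== CLAIM (what is proved, stated in full; the proofs are below) =====
def Claim_equal_create_flexible_grid : Prop := ∀ (batch_size : Int), Dom_create_flexible_grid batch_size → Spec_create_flexible_grid batch_size (create_flexible_grid batch_size)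

-- ===== LEMMAS AND PROOFS =====

-- bit_length upper bound: a < 2 ^ bitLen a
lemma lt_two_pow_bitLen : ∀ a : Nat, a < 2 ^ bitLen a := by
  intro a
  induction a using Nat.strong_induction_on with
  | _ a ih =>
    match a with
    | 0 => simp [bitLen]
    | m + 1 =>
      have h := ih ((m + 1) / 2) (by omega)
      simp only [bitLen, pow_succ]
      omega

-- bit_length lower bound: if bitLen a = k+1 then 2^k ≤ a
lemma two_pow_le_of_bitLen : ∀ a k : Nat, bitLen a = k + 1 → 2 ^ k ≤ a := by
  intro a
  induction a using Nat.strong_induction_on with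
  | _ a ih =>
    match a with
    | 0 => intro k h; simp [bitLen] at h
    | m + 1 =>
      intro k h
      simp only [bitLen, Nat.add_right_cancel_iff] at h
      match k with
      | 0 => omega
      | j + 1 =>
        have h1 := ih ((m + 1) / 2) (by omega) j h
        have h2 : 2 ^ (j + 1) ≤ 2 * ((m + 1) / 2) := by rw [pow_succ]; omega
        omega

-- exponent halves recombine: k/2 + (k+1)/2 = k
lemma half_add_half (k : Nat) : 2 ^ (k / 2) * 2 ^ ((k + 1) / 2) = (2 : Int) ^ k := by
  rw [← pow_add]; congr 1; omega

lemma int_pow_inj {a b : Nat} (h : (2 : Int) ^ a = 2 ^ b) : a = b := by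
  have h' : ((2 ^ a : Nat) : Int) = ((2 ^ b : Nat) : Int) := by push_cast; exact h
  exact Nat.pow_right_injective (le_refl 2) (by exact_mod_cast h')

-- two gridLoop calls with equal value arguments are equal (proof arguments are irrelevant)
lemma gridLoop_congr {n r r' c c' : Int} {hr : 0 < r} {hc : 0 < c} {hr' : 0 < r'} {hc' : 0 < c'}
    (h1 : r = r') (h2 : c = c') : gridLoop n r c hr hc = gridLoop n r' c' hr' hc' := by
  subst h1; subst h2; rfl

-- main loop characterization: from the state after k doublings, if K is the least
-- exponent ≥ k with m ≤ 2^K, the loop stops at the state after K doublings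
lemma gridLoop_eq (m : Int) (K : Nat) (hK : m ≤ 2 ^ K)
    (hmin : ∀ j, j < K → (2 : Int) ^ j < m) :
    ∀ d k, k ≤ K → K ≤ k + d →
      gridLoop m (2 ^ (k / 2)) (2 ^ ((k + 1) / 2)) (by positivity) (by positivity)
        = (2 ^ (K / 2), 2 ^ ((K + 1) / 2)) := by
  intro d
  induction d with
  | zero =>
    intro k hk hd
    have hkK : k = K := by omega
    have hstop : ¬ (2 : Int) ^ (k / 2) * 2 ^ ((k + 1) / 2) < m := by
      rw [half_add_half, hkK]; omega
    rw [gridLoop, dif_neg hstop, hkK]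
  | succ d ih =>
    intro k hk hd
    by_cases hlt : (2 : Int) ^ (k / 2) * 2 ^ ((k + 1) / 2) < m
    · have hltk : (2 : Int) ^ k < m := by rw [half_add_half] at hlt; exact hlt
      have hkK : k < K := by
        by_contra hgek
        have hek : k = K := Nat.le_antisymm hk (Nat.le_of_not_lt hgek)
        rw [hek] at hltk
        omega
      rcases Nat.even_or_odd k with he | ho
      · -- k even: rows = cols, the cols double
        obtain ⟨t, ht⟩ := he
        have hrc : (2 : Int) ^ (k / 2) = 2 ^ ((k + 1) / 2) := by congr 1; omega
        have hc2 : (2 : Int) ^ ((k + 1) / 2) * 2 = 2 ^ ((k + 1 + 1) / 2) := by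
          rw [← pow_succ]; congr 1; omega
        rw [gridLoop, dif_pos hlt, if_pos hrc]
        exact (gridLoop_congr hrc hc2).trans (ih (k + 1) (by omega) (by omega))
      · -- k odd: rows ≠ cols, the rows double
        obtain ⟨t, ht⟩ := ho
        have hne : (2 : Int) ^ (k / 2) ≠ 2 ^ ((k + 1) / 2) := by
          intro h; have := int_pow_inj h; omega
        have hr2 : (2 : Int) ^ (k / 2) * 2 = 2 ^ ((k + 1) / 2) := by
          rw [← pow_succ]; congr 1; omega
        have hc2 : (2 : Int) ^ ((k + 1) / 2) = 2 ^ ((k + 1 + 1) / 2) := by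
          congr 1; omega
        rw [gridLoop, dif_pos hlt, if_neg hne]
        exact (gridLoop_congr hr2 hc2).trans (ih (k + 1) (by omega) (by omega))
    · have hkK : k = K := by
        rcases Nat.lt_or_ge k K with h | h
        · exact absurd (by rw [half_add_half]; exact hmin k h) hlt
        · omega
      rw [gridLoop, dif_neg hlt, hkK]

-- ===== VERDICT (by name: the statement is the Claim_ definition above) =====
theorem create_flexible_grid_spec : Claim_equal_create_flexible_grid := by
  intro bs _
  unfold Spec_create_flexible_grid create_flexible_grid create_flexible_grid_alt
  have hn1 : (1 : Int) ≤ max 1 bs := le_max_left _ _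
  have haeq : (((max 1 bs - 1).toNat : Nat) : Int) = max 1 bs - 1 :=
    Int.toNat_of_nonneg (by omega)
  have hub := lt_two_pow_bitLen (max 1 bs - 1).toNat
  have hcast : ∀ j : Nat, ((2 ^ j : Nat) : Int) = (2 : Int) ^ j := by
    intro j; push_cast; ring
  have hmax : max 1 bs = 1 ∨ max 1 bs = bs := max_choice 1 bs
  have hK : bs ≤ 2 ^ bitLen (max 1 bs - 1).toNat := by
    have h1 : (((max 1 bs - 1).toNat : Nat) : Int)
        < ((2 ^ bitLen (max 1 bs - 1).toNat : Nat) : Int) := by exact_mod_cast hub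
    rw [hcast] at h1
    have hb : bs ≤ max 1 bs := le_max_right _ _
    omega
  have hmin : ∀ j, j < bitLen (max 1 bs - 1).toNat → (2 : Int) ^ j < bs := by
    intro j hj
    have hlow : 2 ^ (bitLen (max 1 bs - 1).toNat - 1) ≤ (max 1 bs - 1).toNat :=
      two_pow_le_of_bitLen _ _ (by omega)
    have hja : 2 ^ j ≤ (max 1 bs - 1).toNat :=
      le_trans (Nat.pow_le_pow_right (by norm_num) (by omega)) hlow
    have ha1 : (1 : Int) ≤ (((max 1 bs - 1).toNat : Nat) : Int) := by
      exact_mod_cast le_trans Nat.one_le_two_pow hja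
    have hji : ((2 ^ j : Nat) : Int) ≤ (((max 1 bs - 1).toNat : Nat) : Int) := by
      exact_mod_cast hja
    rw [hcast] at hji
    omega
  have h0 := gridLoop_eq bs (bitLen (max 1 bs - 1).toNat) hK hmin
    (bitLen (max 1 bs - 1).toNat) 0 (by omega) (by omega)
  simp only [Nat.zero_div, pow_zero] at h0
  exact h0
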